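-- pv_equiv track=rewrite | github.com/chaudhary-keshav/codetrellis-matrix | codetrellis/xstate_parser_enhanced.py | is_xstate_file
-- ===== SOURCE A (Python) =====
-- def is_xstate_file(content: str, file_path: str = "") -> bool:
--     """
--     Check if a file contains XState code.
--
--     Returns True if the file imports from XState ecosystem
--     or uses XState patterns (createMachine, useMachine, etc.)
--     """
--     xstate_indicators = [
--         'xstate', 'createMachine(', 'Machine(',
--         'createActor(', 'interpret(',
--         "from 'xstate", 'from "xstate',
--         "from '@xstate/", 'from "@xstate/',
--         '@xstate/react', '@xstate/vue', '@xstate/svelte',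
--         '@xstate/solid', '@statelyai/inspect',
--         'useMachine(', 'useActor(', 'useActorRef(',
--         'setup({', 'fromPromise(', 'fromCallback(',
--     ]
--     return any(ind in content for ind in xstate_indicators)
-- ===== SOURCE B (Python) =====
-- def is_xstate_file(content: str, file_path: str = "") -> bool:
--     """Single left-to-right position scan: at each offset check whether some
--     indicator starts there (content.startswith(ind, i)), instead of one full
--     substring search per indicator."""
--     xstate_indicators = [
--         'xstate', 'createMachine(', 'Machine(',
--         'createActor(', 'interpret(',
--         "from 'xstate", 'from "xstate',
--         "from '@xstate/", 'from "@xstate/',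
--         '@xstate/react', '@xstate/vue', '@xstate/svelte',
--         '@xstate/solid', '@statelyai/inspect',
--         'useMachine(', 'useActor(', 'useActorRef(',
--         'setup({', 'fromPromise(', 'fromCallback(',
--     ]
--     for i in range(len(content) + 1):
--         if any(content.startswith(ind, i) for ind in xstate_indicators):
--             return True
--     return False
-- ===== Notes on version B (the rewrite author's own statement) =====
-- stated objective: alternative
-- what changed: A runs one independent full substring-membership scan per indicator; B makes a single left-to-right pass over the positions of content and at each offset asks whether any indicator begins there.
import Mathlib
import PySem

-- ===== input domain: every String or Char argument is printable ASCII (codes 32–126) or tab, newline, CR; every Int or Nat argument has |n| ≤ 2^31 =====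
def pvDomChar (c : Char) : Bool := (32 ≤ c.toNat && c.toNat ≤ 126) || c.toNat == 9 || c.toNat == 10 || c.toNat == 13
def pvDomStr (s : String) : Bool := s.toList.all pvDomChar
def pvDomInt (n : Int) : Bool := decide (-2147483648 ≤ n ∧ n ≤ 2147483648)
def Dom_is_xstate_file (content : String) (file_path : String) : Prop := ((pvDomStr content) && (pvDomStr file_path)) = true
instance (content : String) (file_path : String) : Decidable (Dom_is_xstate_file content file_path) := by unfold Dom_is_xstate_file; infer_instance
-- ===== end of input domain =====

-- B replaces A's one-full-substring-scan-per-indicator with a single left-to-right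
-- pass over the positions of content, checking at each offset whether some indicator
-- starts there (objective: alternative; same results, file_path unused in both).

-- ===== PORT A =====
def pvIndicatorsA : List String := [
  "xstate", "createMachine(", "Machine(",
  "createActor(", "interpret(",
  "from 'xstate", "from \"xstate",
  "from '@xstate/", "from \"@xstate/",
  "@xstate/react", "@xstate/vue", "@xstate/svelte",
  "@xstate/solid", "@statelyai/inspect",
  "useMachine(", "useActor(", "useActorRef(",
  "setup({", "fromPromise(", "fromCallback("]

def is_xstate_file (content : String) (file_path : String) : Bool :=
  pvIndicatorsA.any (fun ind => PySem.Str.isIn ind content)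

-- ===== PORT B =====
def pvIndicatorsB : List String := [
  "xstate", "createMachine(", "Machine(",
  "createActor(", "interpret(",
  "from 'xstate", "from \"xstate",
  "from '@xstate/", "from \"@xstate/",
  "@xstate/react", "@xstate/vue", "@xstate/svelte",
  "@xstate/solid", "@statelyai/inspect",
  "useMachine(", "useActor(", "useActorRef(",
  "setup({", "fromPromise(", "fromCallback("]

-- the position loop of Source B: at each offset (suffix) test 'content.startswith(ind, i)'
-- (= some pattern is a prefix of the current suffix), early return on a hit
def pvScan (pats : List (List Char)) : List Char → Bool
  | [] => pats.any (fun p => p.isPrefixOf [])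
  | c :: rest =>
      if pats.any (fun p => p.isPrefixOf (c :: rest)) then true
      else pvScan pats rest

def is_xstate_file_alt (content : String) (file_path : String) : Bool :=
  pvScan (pvIndicatorsB.map String.toList) content.toList

-- ===== PRECONDITION & SPEC =====
def Spec_is_xstate_file (content : String) (file_path : String) (out : Bool) : Prop := out = is_xstate_file_alt content file_path
instance (content : String) (file_path : String) (out : Bool) : Decidable (Spec_is_xstate_file content file_path out) := by unfold Spec_is_xstate_file; infer_instance

-- ===== CLAIM (what is proved, stated in full; the proofs are below) =====
def Claim_equal_is_xstate_file : Prop := ∀ (content : String) (file_path : String), Dom_is_xstate_file content file_path → Spec_is_xstate_file content file_path (is_xstate_file content file_path)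

-- ===== LEMMAS AND PROOFS =====
lemma pvScan_iff (pats : List (List Char)) (s : List Char) :
    pvScan pats s = true ↔ ∃ p ∈ pats, ∃ j, p <+: s.drop j := by
  induction s with
  | nil =>
      simp [pvScan, List.any_eq_true, List.isPrefixOf_iff_prefix]
  | cons c rest ih =>
      constructor
      · intro h
        rw [pvScan] at h
        split_ifs at h with hhit
        · rcases List.any_eq_true.mp hhit with ⟨p, hp, hpre⟩
          exact ⟨p, hp, 0, by simpa [List.isPrefixOf_iff_prefix] using hpre⟩
        · rcases ih.mp h with ⟨p, hp, j, hj⟩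
          exact ⟨p, hp, j + 1, by simpa using hj⟩
      · rintro ⟨p, hp, j, hj⟩
        rw [pvScan]
        split_ifs with hhit
        · rfl
        · cases j with
          | zero =>
              have hj' : p <+: c :: rest := by simpa using hj
              exact absurd (List.any_eq_true.mpr
                ⟨p, hp, show p.isPrefixOf (c :: rest) = true from
                  List.isPrefixOf_iff_prefix.mpr hj'⟩) hhit
          | succ j =>
              exact ih.mpr ⟨p, hp, j, by simpa using hj⟩

-- ===== VERDICT (by name: the statement is the Claim_ definition above) =====
theorem is_xstate_file_spec : Claim_equal_is_xstate_file := by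
  intro content file_path _
  unfold Spec_is_xstate_file is_xstate_file is_xstate_file_alt
  have hlists : pvIndicatorsB = pvIndicatorsA := rfl
  rw [hlists, Bool.eq_iff_iff, pvScan_iff, List.any_eq_true]
  constructor
  · rintro ⟨ind, hind, hin⟩
    refine ⟨ind.toList, List.mem_map_of_mem hind, ?_⟩
    have hinf : ind.toList <:+: content.toList := (PySem.Str.isIn_iff_infix _ _).mp hin
    have : PySem.Chars.isIn ind.toList content.toList = true := by
      rw [PySem.Chars.isIn_iff_infix]; exact hinf
    rcases (PySem.Chars.exists_prefix_drop_iff_isIn _ _).mpr this with h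
    exact h
  · rintro ⟨p, hp, j, hj⟩
    rcases List.mem_map.mp hp with ⟨ind, hind, rfl⟩
    refine ⟨ind, hind, ?_⟩
    have hisin : PySem.Chars.isIn ind.toList content.toList = true :=
      (PySem.Chars.exists_prefix_drop_iff_isIn _ _).mp ⟨j, hj⟩
    rw [PySem.Str.isIn_iff_infix, ← PySem.Chars.isIn_iff_infix]
    exact hisin
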